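-- pv_equiv track=rewrite | github.com/maria-pugacheva/LeetCode | src/python/_01_easy/_2595_number-of-even-and-odd-bits.py | solution
-- ===== SOURCE A (Python) =====
-- from typing import List
--
-- def solution(n: int) -> List[int]:
--     """In the binary representation of n (0-indexed), count the number
--     of even indices with value 1 and the number of odd indices with
--     value 1. Return an integer array res where res = [even, odd].
--
--     Examples:
--         >>> solution(2)
--         [0, 1]
--         >>> solution(17)
--         [2, 0]
--         >>> solution(3)
--         [1, 1]
--     """
--     b = bin(n)
--     res = [0, 0]
--     for i in range(2, len(b)):
--         if b[i] == '1':
--             if (i & 1 and len(b) & 1) or (not i & 1 and not len(b) & 1):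
--                 res[1] += 1
--             else:
--                 res[0] += 1
--     return res
-- ===== SOURCE B (Python) =====
-- def solution(n):
--     """Count set bits of n at even/odd binary positions -> [even, odd].
--
--     Walks the integer itself from the least significant bit with shifts
--     instead of scanning the string bin(n); sign-agnostic like A.
--     """
--     m = n if n >= 0 else -n
--     res = [0, 0]
--     i = 0
--     while m:
--         if m & 1:
--             res[i & 1] += 1
--         m >>= 1
--         i += 1
--     return res
-- ===== Notes on version B (the rewrite author's own statement) =====
-- stated objective: idiomatic
-- what changed: B replaces A's scan over the string bin(n) with its MSB-vs-length parity trick by a direct LSB-first bit loop on abs(n) (shift right, test the low bit, track the position parity), never building a string.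
import Mathlib
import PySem

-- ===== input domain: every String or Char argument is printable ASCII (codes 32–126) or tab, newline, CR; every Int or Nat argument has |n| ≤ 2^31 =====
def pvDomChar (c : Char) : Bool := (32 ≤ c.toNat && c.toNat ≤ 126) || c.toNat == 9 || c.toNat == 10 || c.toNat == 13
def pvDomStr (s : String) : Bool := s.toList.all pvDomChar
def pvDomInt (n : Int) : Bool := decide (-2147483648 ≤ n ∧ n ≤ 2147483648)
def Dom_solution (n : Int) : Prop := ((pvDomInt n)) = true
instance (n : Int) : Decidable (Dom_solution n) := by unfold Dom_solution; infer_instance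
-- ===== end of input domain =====

-- B replaces A's scan over the string bin(n) by a direct LSB-first bit loop on abs(n); return values agree, no side effects.

-- ===== PORT A =====
-- A builds b = bin(n) (ported as PySem.Int.pyBin, read as its char list), then for
-- i in range(2, len(b)) classifies each '1' char by the parity of i against the
-- parity of len(b); the mutable list res = [0, 0] is carried as the pair (res[0], res[1]).
def solution (n : Int) : List Int :=
  let b : List Char := (PySem.Int.pyBin n).toList
  let res : Int × Int :=
    (PySem.List.pyRange 2 (PySem.List.len b) 1).foldl
      (fun (res : Int × Int) i =>
        if PySem.List.pyGetD b i ' ' = '1' then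
          if (PySem.Int.band i 1 ≠ 0 ∧ PySem.Int.band (PySem.List.len b) 1 ≠ 0)
              ∨ (PySem.Int.band i 1 = 0 ∧ PySem.Int.band (PySem.List.len b) 1 = 0)
          then (res.1, res.2 + 1) else (res.1 + 1, res.2)
        else res)
      (0, 0)
  [res.1, res.2]

-- ===== PORT B =====
-- B's 'while m:' loop over the shrinking non-negative m, as structural recursion:
-- 'm >>= 1' is m / 2 and 'm & 1' / 'i & 1' are m % 2 / i % 2 (exact for m, i ≥ 0);
-- the mutable res = [0, 0] is carried as the pair (e, o) = (res[0], res[1]).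
def solLoopB (m i : Nat) (e o : Int) : Int × Int :=
  if h : m = 0 then (e, o)
  else if m % 2 = 1 then
    if i % 2 = 1 then solLoopB (m / 2) (i + 1) e (o + 1)
    else solLoopB (m / 2) (i + 1) (e + 1) o
  else solLoopB (m / 2) (i + 1) e o
termination_by m
decreasing_by all_goals exact Nat.div_lt_self (Nat.pos_of_ne_zero h) one_lt_two

def solution_alt (n : Int) : List Int :=
  let m : Nat := if 0 ≤ n then n.toNat else (-n).toNat
  let r := solLoopB m 0 0 0
  [r.1, r.2]

-- ===== PRECONDITION & SPEC =====
def Spec_solution (n : Int) (out : List Int) : Prop := out = solution_alt n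
instance (n : Int) (out : List Int) : Decidable (Spec_solution n out) := by unfold Spec_solution; infer_instance

-- ===== CLAIM (what is proved, stated in full; the proofs are below) =====
def Claim_equal_solution : Prop := ∀ (n : Int), Dom_solution n → Spec_solution n (solution n)

-- ===== LEMMAS AND PROOFS =====

-- Common spec: cnt m = (number of set bits of m at even positions, at odd positions).
def cnt (m : Nat) : Nat × Nat :=
  if h : m = 0 then (0, 0)
  else ((if m % 2 = 1 then (cnt (m / 2)).2 + 1 else (cnt (m / 2)).2), (cnt (m / 2)).1)
termination_by m
decreasing_by exact Nat.div_lt_self (Nat.pos_of_ne_zero h) one_lt_two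

-- B's loop computes cnt (with the roles of the slots swapped at odd i).
theorem solLoopB_cnt (m : Nat) : ∀ (i : Nat) (e o : Int),
    solLoopB m i e o =
      if i % 2 = 0 then (e + ((cnt m).1 : Int), o + ((cnt m).2 : Int))
      else (e + ((cnt m).2 : Int), o + ((cnt m).1 : Int)) := by
  induction m using Nat.strong_induction_on with
  | _ m ih =>
    intro i e o
    rw [solLoopB, cnt]
    by_cases h : m = 0
    · rcases Nat.mod_two_eq_zero_or_one i with hi | hi <;> simp [h, hi]
    · have hd : m / 2 < m := Nat.div_lt_self (Nat.pos_of_ne_zero h) one_lt_two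
      rcases Nat.mod_two_eq_zero_or_one m with h2 | h2 <;>
        rcases Nat.mod_two_eq_zero_or_one i with hi | hi <;>
          have hi1 : (i + 1) % 2 = 1 - i % 2 := by omega
      all_goals
        simp only [h, dif_neg, not_false_iff, h2, hi, hi1, ih _ hd]
        norm_num
      all_goals ring

-- The binary digit characters of m, most significant first (= Nat.toDigits 2 m).
def binChars (m : Nat) : List Char :=
  if _h : m < 2 then [Nat.digitChar m]
  else binChars (m / 2) ++ [Nat.digitChar (m % 2)]
termination_by m
decreasing_by exact Nat.div_lt_self (by omega) one_lt_two

theorem toDigitsCore_eq (fuel : Nat) : ∀ (m : Nat) (acc : List Char), m < fuel →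
    Nat.toDigitsCore 2 fuel m acc = binChars m ++ acc := by
  induction fuel with
  | zero => omega
  | succ k ih =>
    intro m acc hm
    rw [Nat.toDigitsCore]
    by_cases h0 : m / 2 = 0
    · have hm2 : m < 2 := by omega
      rw [binChars]
      simp [h0, hm2, Nat.mod_eq_of_lt hm2]
    · have hk : m / 2 < k := by omega
      have hm2 : ¬ m < 2 := by omega
      rw [ih _ _ hk]
      conv_rhs => rw [binChars]
      rw [dif_neg hm2]
      simp [h0]

theorem toDigits_eq (m : Nat) : Nat.toDigits 2 m = binChars m := by
  rw [Nat.toDigits]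
  simpa using toDigitsCore_eq (m + 1) m [] (by omega)

-- A's index/length parity condition, restated over Nat indices.
theorem cond_iff (u v : Nat) :
    ((PySem.Int.band (u : Int) 1 ≠ 0 ∧ PySem.Int.band (v : Int) 1 ≠ 0)
      ∨ (PySem.Int.band (u : Int) 1 = 0 ∧ PySem.Int.band (v : Int) 1 = 0))
    ↔ u % 2 = v % 2 := by
  rw [PySem.Int.band_one, PySem.Int.band_one]
  have hu : PySem.Int.mod (u : Int) 2 = ((u % 2 : Nat) : Int) := by
    exact_mod_cast PySem.Int.mod_natCast u 2
  have hv : PySem.Int.mod (v : Int) 2 = ((v % 2 : Nat) : Int) := by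
    exact_mod_cast PySem.Int.mod_natCast v 2
  rw [hu, hv]
  constructor <;> intro h <;> omega

-- A's accumulator loop is a pair of countP's.
theorem foldl_pair_count (l : List Int) (t c : Int → Prop)
    [DecidablePred t] [DecidablePred c] : ∀ (e o : Int),
    l.foldl (fun r i => if t i then (if c i then (r.1, r.2 + 1) else (r.1 + 1, r.2)) else r) (e, o)
    = (e + (l.countP (fun i => decide (t i ∧ ¬ c i)) : Int),
       o + (l.countP (fun i => decide (t i ∧ c i)) : Int)) := by
  induction l with
  | nil => simp
  | cons a l ih =>
    intro e o
    by_cases ht : t a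
    · by_cases hc : c a <;> simp [ht, hc, ih] <;> omega
    · simp [ht, ih]

-- A's counts over the digit string of m equal cnt m:
-- a '1' at string offset j sits at bit position (len - 1 - j), so parity(j) = parity(len)
-- means an odd bit position.
theorem countP_binChars (m : Nat) :
    (List.range (binChars m).length).countP
        (fun j => decide ((binChars m).getD j ' ' = '1' ∧ ¬ j % 2 = (binChars m).length % 2))
      = (cnt m).1
  ∧ (List.range (binChars m).length).countP
        (fun j => decide ((binChars m).getD j ' ' = '1' ∧ j % 2 = (binChars m).length % 2))
      = (cnt m).2 := by
  induction m using Nat.strong_induction_on with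
  | _ m ih =>
    by_cases h : m < 2
    · have hc0 : cnt 0 = (0, 0) := by rw [cnt]; simp
      interval_cases m <;> rw [binChars, cnt] <;>
        simp [hc0, List.countP, List.countP.go, Nat.digitChar]
    · have hd : m / 2 < m := Nat.div_lt_self (by omega) one_lt_two
      obtain ⟨ih1, ih2⟩ := ih _ hd
      rw [binChars, cnt]
      simp only [dif_neg h, dif_neg (show ¬ m = 0 by omega)]
      set cs := binChars (m / 2) with hcs
      set L' := cs.length with hL'
      have hlen : (cs ++ [Nat.digitChar (m % 2)]).length = L' + 1 := by simp [hL']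
      have hgetlast : (cs ++ [Nat.digitChar (m % 2)]).getD L' ' ' = Nat.digitChar (m % 2) := by
        rw [List.getD_append_right _ _ _ _ (le_refl _)]
        simp
      have hget : ∀ j, j < L' → (cs ++ [Nat.digitChar (m % 2)]).getD j ' ' = cs.getD j ' ' := by
        intro j hj; exact List.getD_append _ _ _ _ hj
      have hdig : (Nat.digitChar (m % 2) = '1') ↔ m % 2 = 1 := by
        rcases Nat.mod_two_eq_zero_or_one m with h2 | h2 <;> rw [h2] <;> simp [Nat.digitChar]
      rw [hlen, List.range_succ, List.countP_append, List.countP_append]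
      have hcongr1 : (List.range L').countP
            (fun j => decide ((cs ++ [Nat.digitChar (m % 2)]).getD j ' ' = '1' ∧ ¬ j % 2 = (L' + 1) % 2))
          = (List.range L').countP
            (fun j => decide (cs.getD j ' ' = '1' ∧ j % 2 = L' % 2)) := by
        apply List.countP_congr
        intro j hj
        have hjL : j < L' := List.mem_range.mp hj
        simp only [hget j hjL, decide_eq_true_eq]
        constructor <;> rintro ⟨ha, hb⟩ <;> exact ⟨ha, by omega⟩
      have hcongr2 : (List.range L').countP
            (fun j => decide ((cs ++ [Nat.digitChar (m % 2)]).getD j ' ' = '1' ∧ j % 2 = (L' + 1) % 2))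
          = (List.range L').countP
            (fun j => decide (cs.getD j ' ' = '1' ∧ ¬ j % 2 = L' % 2)) := by
        apply List.countP_congr
        intro j hj
        have hjL : j < L' := List.mem_range.mp hj
        simp only [hget j hjL, decide_eq_true_eq]
        constructor <;> rintro ⟨ha, hb⟩ <;> exact ⟨ha, by omega⟩
      constructor
      · rw [hcongr1]
        have hlast : ([L'].countP
            (fun j => decide ((cs ++ [Nat.digitChar (m % 2)]).getD j ' ' = '1' ∧ ¬ j % 2 = (L' + 1) % 2)))
            = if m % 2 = 1 then 1 else 0 := by
          simp only [List.countP_cons, List.countP_nil, hgetlast, decide_eq_true_eq]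
          rcases Nat.mod_two_eq_zero_or_one m with h2 | h2 <;>
            simp [h2, show ¬ L' % 2 = (L' + 1) % 2 by omega] <;> simp [Nat.digitChar]
        rw [hlast, ih2]
        rcases Nat.mod_two_eq_zero_or_one m with h2 | h2 <;> simp [h2]
      · rw [hcongr2]
        have hlast : ([L'].countP
            (fun j => decide ((cs ++ [Nat.digitChar (m % 2)]).getD j ' ' = '1' ∧ j % 2 = (L' + 1) % 2)))
            = 0 := by
          simp [show ¬ L' % 2 = (L' + 1) % 2 by omega]
        rw [hlast, ih1]
        simp

-- Shared index bookkeeping for A's scan: the prefix ('0b' / '-0b') contributes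
-- nothing, and indices P..P+L-1 enumerate the digit offsets 0..L-1.
theorem countP_split (pre cs : List Char)
    (hP : pre.length = 2 ∨ (pre.length = 3 ∧ pre.getD 2 ' ' ≠ '1'))
    (q : Int → Bool) (hq : ∀ i, q i = true → PySem.List.pyGetD (pre ++ cs) i ' ' = '1') :
    (PySem.List.pyRange 2 ((pre.length + cs.length : Nat) : Int) 1).countP q
      = (List.range cs.length).countP (fun (j : Nat) => q ((pre.length : Int) + (j : Int))) := by
  have hP2 : 2 ≤ pre.length := by rcases hP with h | ⟨h, _⟩ <;> omega
  rw [PySem.List.pyRange_one_append 2 ((pre.length : Nat) : Int)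
        ((pre.length + cs.length : Nat) : Int) (by omega) (by push_cast; omega),
      List.countP_append]
  have hpre : (PySem.List.pyRange 2 ((pre.length : Nat) : Int) 1).countP q = 0 := by
    rcases hP with h | ⟨h, hb⟩
    · rw [h, show ((2 : Nat) : Int) = 2 from by norm_num,
          PySem.List.pyRange_one_eq_nil (le_refl 2)]
      rfl
    · rw [h, show ((3 : Nat) : Int) = 2 + 1 from by norm_num,
          PySem.List.pyRange_one_singleton 2]
      have hq2 : q 2 = false := by
        cases hq2 : q 2
        · rfl
        · exfalso
          apply hb
          have h1 := hq 2 hq2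
          rw [show (2 : Int) = ((2 : Nat) : Int) from by norm_num,
              PySem.List.pyGetD_natCast] at h1
          rw [← h1]
          exact (List.getD_append _ _ _ _ (by omega)).symm
      simp [hq2]
  rw [hpre, zero_add, PySem.List.pyRange_one,
      show (((pre.length + cs.length : Nat) : Int) - ((pre.length : Nat) : Int)).toNat
        = cs.length from by push_cast; omega,
      List.countP_map]
  apply List.countP_congr
  intro x _
  rfl

-- A's whole fold, for b = pre ++ cs with a 2- or 3-char prefix whose chars past
-- index 1 are never '1' (the '0b' / '-0b' prefix of bin).
theorem fold_result (pre cs : List Char)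
    (hP : pre.length = 2 ∨ (pre.length = 3 ∧ pre.getD 2 ' ' ≠ '1')) :
    (PySem.List.pyRange 2 (PySem.List.len (pre ++ cs)) 1).foldl
      (fun (res : Int × Int) i =>
        if PySem.List.pyGetD (pre ++ cs) i ' ' = '1' then
          if (PySem.Int.band i 1 ≠ 0 ∧ PySem.Int.band (PySem.List.len (pre ++ cs)) 1 ≠ 0)
              ∨ (PySem.Int.band i 1 = 0 ∧ PySem.Int.band (PySem.List.len (pre ++ cs)) 1 = 0)
          then (res.1, res.2 + 1) else (res.1 + 1, res.2)
        else res)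
      (0, 0)
    = (((List.range cs.length).countP
          (fun j => decide (cs.getD j ' ' = '1' ∧ ¬ j % 2 = cs.length % 2)) : Int),
       ((List.range cs.length).countP
          (fun j => decide (cs.getD j ' ' = '1' ∧ j % 2 = cs.length % 2)) : Int)) := by
  have hlen : PySem.List.len (pre ++ cs) = ((pre.length + cs.length : Nat) : Int) := by
    simp [PySem.List.len_eq]
  simp only [hlen]
  rw [foldl_pair_count _ (fun i => PySem.List.pyGetD (pre ++ cs) i ' ' = '1')
      (fun i => (PySem.Int.band i 1 ≠ 0
            ∧ PySem.Int.band ((pre.length + cs.length : Nat) : Int) 1 ≠ 0)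
          ∨ (PySem.Int.band i 1 = 0
            ∧ PySem.Int.band ((pre.length + cs.length : Nat) : Int) 1 = 0))]
  simp only [zero_add, Prod.mk.injEq]
  constructor
  · rw [countP_split pre cs hP _ (fun i h => (of_decide_eq_true h).1)]
    norm_cast
    apply List.countP_congr
    intro j hj
    have hjL : j < cs.length := List.mem_range.mp hj
    simp only [PySem.List.pyGetD_natCast, decide_eq_true_eq]
    rw [List.getD_append_right _ _ _ _ (by omega), Nat.add_sub_cancel_left]
    constructor
    · rintro ⟨ha, hb⟩
      rw [cond_iff] at hb
      exact ⟨ha, by omega⟩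
    · rintro ⟨ha, hb⟩
      refine ⟨ha, ?_⟩
      rw [cond_iff]
      omega
  · rw [countP_split pre cs hP _ (fun i h => (of_decide_eq_true h).1)]
    norm_cast
    apply List.countP_congr
    intro j hj
    have hjL : j < cs.length := List.mem_range.mp hj
    simp only [PySem.List.pyGetD_natCast, decide_eq_true_eq]
    rw [List.getD_append_right _ _ _ _ (by omega), Nat.add_sub_cancel_left]
    constructor
    · rintro ⟨ha, hb⟩
      rw [cond_iff] at hb
      exact ⟨ha, by omega⟩
    · rintro ⟨ha, hb⟩
      refine ⟨ha, ?_⟩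
      rw [cond_iff]
      omega

-- A computes [cnt |n| .1, cnt |n| .2].
theorem solution_eq (n : Int) :
    solution n = [((cnt n.natAbs).1 : Int), ((cnt n.natAbs).2 : Int)] := by
  obtain ⟨h1, h2⟩ := countP_binChars n.natAbs
  simp only [solution, PySem.Int.toList_pyBin, PySem.Int.toBinChars0b]
  by_cases hn : n < 0
  · rw [if_pos hn, toDigits_eq,
        show ('-' :: '0' :: 'b' :: binChars n.natAbs)
          = ['-', '0', 'b'] ++ binChars n.natAbs from rfl,
        fold_result _ _ (Or.inr ⟨rfl, by decide⟩), h1, h2]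
  · rw [if_neg hn, toDigits_eq, show n.toNat = n.natAbs from by omega,
        show ('0' :: 'b' :: binChars n.natAbs)
          = ['0', 'b'] ++ binChars n.natAbs from rfl,
        fold_result _ _ (Or.inl rfl), h1, h2]

-- B computes the same.
theorem solution_alt_eq (n : Int) :
    solution_alt n = [((cnt n.natAbs).1 : Int), ((cnt n.natAbs).2 : Int)] := by
  unfold solution_alt
  have hm : (if 0 ≤ n then n.toNat else (-n).toNat) = n.natAbs := by
    split <;> omega
  simp [hm, solLoopB_cnt]

-- ===== VERDICT (by name: the statement is the Claim_ definition above) =====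
theorem solution_spec : Claim_equal_solution := by
  intro n _
  unfold Spec_solution
  rw [solution_eq, solution_alt_eq]
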